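-- pv_equiv track=rewrite | github.com/Farzy/hackerrank | algorithms/between-two-sets.py | getTotalX
-- ===== SOURCE A (Python) =====
-- def getTotalX(a, b):
--     numbers_between = range(a[-1], b[0]+1)
--
--     def is_multiple_of_a(n):
--         for i in a:
--             if n % i != 0:
--                 return False
--         return True
--
--     def is_factor_of_b(n):
--         for i in b:
--             if i % n != 0:
--                 return False
--         return True
--
--     numbers_between = list(filter(is_multiple_of_a, numbers_between))
--     numbers_between = list(filter(is_factor_of_b, numbers_between))
--     return len(numbers_between)
-- ===== SOURCE B (Python) =====
-- def getTotalX(a, b):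
--     def gcd(x, y):
--         while y:
--             x, y = y, x % y
--         return abs(x)
--
--     lo, hi = a[-1], b[0]
--     limit = max(abs(lo), abs(hi))
--     L = 1
--     for x in a:
--         if L > limit:
--             break  # no nonzero multiple of L can lie in [lo, hi] any more
--         g = gcd(L, x)
--         L = 0 if g == 0 else abs(L * x) // g
--     G = 0
--     for x in b:
--         G = gcd(G, x)
--     count = 0
--     if L != 0:
--         # common multiples of a are exactly the multiples of lcm(a) (only 0 is a multiple of 0);
--         # a common divisor of b is a nonzero divisor of G = gcd(b)
--         start = -(-lo // L) * L  # smallest multiple of L that is >= lo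
--         for n in range(start, hi + 1, L):
--             if n != 0 and G % n == 0:
--                 count += 1
--     return count
-- ===== Notes on version B (the rewrite author's own statement) =====
-- stated objective: alternative
-- what changed: B precomputes lcm(a) (stopping once it exceeds max(|a[-1]|,|b[0]|), beyond which no candidate can be a multiple) and gcd(b) with a hand-written Euclid helper, then walks only the multiples of the lcm inside the range testing gcd % n == 0, instead of A's per-element inner loops over a and b for every number in the range.
-- outside the precondition, e.g. on getTotalX([19, 0, -17], [-4]): A returns 0, B returns 0
import Mathlib
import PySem

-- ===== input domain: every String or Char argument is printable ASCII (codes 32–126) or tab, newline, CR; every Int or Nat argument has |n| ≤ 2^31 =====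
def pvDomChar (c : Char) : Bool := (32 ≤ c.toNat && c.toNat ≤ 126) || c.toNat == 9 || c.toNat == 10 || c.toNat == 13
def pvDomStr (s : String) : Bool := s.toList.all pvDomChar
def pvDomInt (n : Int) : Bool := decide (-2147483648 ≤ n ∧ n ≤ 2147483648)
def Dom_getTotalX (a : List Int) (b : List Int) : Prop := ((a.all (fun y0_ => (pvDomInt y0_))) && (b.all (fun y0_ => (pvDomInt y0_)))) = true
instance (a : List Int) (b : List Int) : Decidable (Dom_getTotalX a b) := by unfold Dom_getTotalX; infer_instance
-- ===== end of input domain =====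

-- B replaces A's per-element inner scans of a and b (run for every number of the range) by one
-- precomputation of lcm(a) and gcd(b) followed by a walk over the multiples of the lcm only.

-- ===== PORT A =====
def getTotalX (a : List Int) (b : List Int) : Int :=
  match PySem.List.pyGet? a (-1), PySem.List.pyGet? b 0 with
  | some lo, some hi =>
      let r0 := PySem.List.pyRange lo (hi + 1) 1
      let r1 := r0.filter (fun n => a.all (fun i => PySem.Int.mod n i == 0))
      let r2 := r1.filter (fun n => b.all (fun i => PySem.Int.mod i n == 0))
      (r2.length : Int)
  | _, _ => 0   -- a or b empty: the Python raises IndexError (outside Pre_)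

-- ===== PORT B =====
-- Source B's helper gcd(x, y): while y: x, y = y, x % y; return abs(x)
def pyGcd (x y : Int) : Int :=
  if _h : y = 0 then |x|
  else pyGcd y (PySem.Int.mod x y)
termination_by y.natAbs
decreasing_by
  rcases lt_or_gt_of_ne _h with hneg | hpos
  · have := PySem.Int.mod_neg_bounds x hneg; omega
  · have h1 := PySem.Int.mod_nonneg x hpos
    have h2 := PySem.Int.mod_lt x hpos
    omega

def getTotalX_alt (a : List Int) (b : List Int) : Int :=
  match PySem.List.pyGet? a (-1) with
  | none => 0   -- a empty: Source B raises IndexError (outside Pre_)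
  | some lo =>
    match PySem.List.pyGet? b 0 with
    | none => 0   -- b empty: Source B raises IndexError (outside Pre_)
    | some hi =>
      let limit := max |lo| |hi|
      -- the 'if L > limit: break' of Source B: once the accumulator exceeds limit it freezes
      let L := a.foldl (fun l x =>
        if l > limit then l
        else
          let g := pyGcd l x
          if g == 0 then 0 else PySem.Int.floordiv |l * x| g) 1
      let G := b.foldl (fun g x => pyGcd g x) 0
      if L != 0 then
        let start := -(PySem.Int.floordiv (-lo) L) * L
        (PySem.List.pyRange start (hi + 1) L).foldl
          (fun c n => if n != 0 && PySem.Int.mod G n == 0 then c + 1 else c) 0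
      else 0

-- ===== PRECONDITION & SPEC =====
-- Pre_ excludes exactly the zero-related inputs: empty a or b (IndexError); 0 inside the nonempty
-- range [a[-1], b[0]] (ZeroDivisionError when n = 0 reaches the second filter); and 0 ∈ a with a
-- nonempty range, where A raises unless its first filter's early exit happens to skip the 0, in
-- which rare case A returns 0 (and B returns 0 there too).
def Pre_getTotalX (a : List Int) (b : List Int) : Prop :=
  a ≠ [] ∧ b ≠ [] ∧
    ∀ lo ∈ a.getLast?, ∀ hi ∈ b.head?, lo ≤ hi → ((0:Int) ∉ a ∧ (0 < lo ∨ hi < 0))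
instance (a : List Int) (b : List Int) : Decidable (Pre_getTotalX a b) := by
  unfold Pre_getTotalX; infer_instance

def pvWitness_getTotalX : List Int × List Int := ([2, 3], [12, 24])

def Spec_getTotalX (a : List Int) (b : List Int) (out : Int) : Prop := out = getTotalX_alt a b
instance (a : List Int) (b : List Int) (out : Int) : Decidable (Spec_getTotalX a b out) := by
  unfold Spec_getTotalX; infer_instance

-- ===== CLAIM (what is proved, stated in full; the proofs are below) =====
def Claim_equal_getTotalX : Prop := ∀ (a : List Int) (b : List Int), Dom_getTotalX a b → Pre_getTotalX a b → Spec_getTotalX a b (getTotalX a b)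

-- ===== LEMMAS AND PROOFS =====

-- the hand-written Euclid helper of Source B computes Int.gcd
theorem pyGcd_eq (x y : Int) : pyGcd x y = (Int.gcd x y : Int) := by
  induction x, y using pyGcd.induct with
  | case1 x => rw [pyGcd, dif_pos rfl, Int.abs_eq_natAbs]; simp [Int.gcd]
  | case2 x y h ih =>
    rw [pyGcd, dif_neg h, ih]
    have hm : PySem.Int.mod x y = x + y * (-(PySem.Int.floordiv x y)) := by
      have := PySem.Int.floordiv_mul_add_mod x y
      rw [mul_neg, mul_comm]; omega
    rw [hm, Int.gcd_add_mul_left_right, Int.gcd_comm]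

-- one step of Source B's running-lcm loop is Int.lcm
theorem step_eq_lcm (l x : Int) :
    (if pyGcd l x == 0 then 0 else PySem.Int.floordiv |l * x| (pyGcd l x)) = (Int.lcm l x : Int) := by
  rw [pyGcd_eq]
  by_cases hg : Int.gcd l x = 0
  · obtain ⟨hl, hx⟩ := Int.gcd_eq_zero_iff.mp hg
    simp [hl, hx, Int.lcm]
  · have hpos : 0 < ((Int.gcd l x : Int)) := by exact_mod_cast Nat.pos_of_ne_zero hg
    rw [if_neg (by simpa using hpos.ne')]
    rw [PySem.Int.floordiv_eq_ediv_of_pos hpos]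
    have habs : |l * x| = ((l.natAbs * x.natAbs : Nat) : Int) := by
      rw [Int.abs_eq_natAbs, Int.natAbs_mul]
    rw [habs, ← Int.natCast_div]
    rfl

-- the lcm fold characterizes "multiple of every element"
theorem foldl_lcm_dvd (a : List Int) (init n : Int) :
    (a.foldl (fun l x => (Int.lcm l x : Int)) init) ∣ n ↔ (init ∣ n ∧ ∀ i ∈ a, i ∣ n) := by
  induction a generalizing init with
  | nil => simp
  | cons x t ih => simp [List.foldl_cons, ih, Int.coe_lcm_dvd_iff]; tauto

-- the lcm fold of a zero-free list is nonzero
theorem foldl_lcm_ne_zero (a : List Int) (init : Int) (h0 : init ≠ 0)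
    (ha : ∀ i ∈ a, i ≠ 0) : a.foldl (fun l x => (Int.lcm l x : Int)) init ≠ 0 := by
  induction a generalizing init with
  | nil => simpa using h0
  | cons x t ih =>
    rw [List.foldl_cons]
    refine ih _ ?_ (fun i hi => ha i (List.mem_cons_of_mem _ hi))
    have hx : x ≠ 0 := ha x (List.mem_cons_self ..)
    simp only [ne_eq, Int.natCast_eq_zero, Int.lcm_eq_zero_iff]
    tauto

-- the gcd fold characterizes "divisor of every element"
theorem foldl_gcd_dvd (b : List Int) (init n : Int) :
    n ∣ (b.foldl (fun g x => (Int.gcd g x : Int)) init) ↔ (n ∣ init ∧ ∀ i ∈ b, n ∣ i) := by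
  induction b generalizing init with
  | nil => simp
  | cons x t ih => simp [List.foldl_cons, ih, Int.dvd_coe_gcd_iff]; tauto

-- every accumulator divides the final lcm fold
theorem dvd_foldl_lcm (t : List Int) (init : Int) :
    init ∣ t.foldl (fun l x => (Int.lcm l x : Int)) init := by
  induction t generalizing init with
  | nil => exact dvd_rfl
  | cons x t ih =>
    rw [List.foldl_cons]
    exact dvd_trans (Int.dvd_lcm_left init x) (ih _)

-- once the saturating fold's accumulator exceeds the limit it stays put
theorem satfold_frozen (t : List Int) (limit init : Int) (h : limit < init) :
    t.foldl (fun l x => if l > limit then l else (Int.lcm l x : Int)) init = init := by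
  induction t with
  | nil => rfl
  | cons x t ih => rw [List.foldl_cons, if_pos h]; exact ih

-- the saturating fold is nonnegative
theorem satfold_nonneg (t : List Int) (limit init : Int) (h0 : 0 ≤ init) :
    0 ≤ t.foldl (fun l x => if l > limit then l else (Int.lcm l x : Int)) init := by
  induction t generalizing init with
  | nil => simpa using h0
  | cons x t ih =>
    rw [List.foldl_cons]
    split
    · exact ih _ h0
    · exact ih _ (Int.natCast_nonneg _)

-- the saturating fold either equals the full lcm fold or exceeds the limit while dividing it
theorem satfold_cases (t : List Int) (limit init : Int) :
    t.foldl (fun l x => if l > limit then l else (Int.lcm l x : Int)) init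
      = t.foldl (fun l x => (Int.lcm l x : Int)) init
    ∨ (limit < t.foldl (fun l x => if l > limit then l else (Int.lcm l x : Int)) init
        ∧ t.foldl (fun l x => if l > limit then l else (Int.lcm l x : Int)) init
          ∣ t.foldl (fun l x => (Int.lcm l x : Int)) init) := by
  induction t generalizing init with
  | nil => exact Or.inl rfl
  | cons x t ih =>
    rw [List.foldl_cons, List.foldl_cons]
    by_cases hf : init > limit
    · rw [if_pos hf, satfold_frozen t limit init hf]
      exact Or.inr ⟨hf, dvd_trans (Int.dvd_lcm_left init x) (dvd_foldl_lcm t _)⟩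
    · rw [if_neg hf]; exact ih _

-- stepped range is duplicate-free (for positive step)
theorem nodup_pyRange_of_pos (a b s : Int) (hs : 0 < s) :
    (PySem.List.pyRange a b s).Nodup := by
  rw [PySem.List.pyRange_of_pos a b hs]
  refine List.Nodup.map ?_ (List.nodup_range)
  intro k1 k2 h
  dsimp only at h
  have : s * (k1 : Int) = s * (k2 : Int) := by omega
  have := mul_left_cancel₀ hs.ne' this
  exact_mod_cast this

-- the multiples of L in [lo, hi+1) are exactly the stepped range from the first multiple ≥ lo
theorem filter_dvd_perm_stepped (L lo hi : Int) (hL : 0 < L) :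
    ((PySem.List.pyRange lo (hi + 1) 1).filter (fun n => decide (L ∣ n))).Perm
      (PySem.List.pyRange (-(PySem.Int.floordiv (-lo) L) * L) (hi + 1) L) := by
  have hid := PySem.Int.floordiv_mul_add_mod (-lo) L
  have hm0 := PySem.Int.mod_nonneg (-lo) hL
  have hmL := PySem.Int.mod_lt (-lo) hL
  set m := PySem.Int.mod (-lo) L with hm
  set start := -(PySem.Int.floordiv (-lo) L) * L with hstart
  have hstart_eq : start = lo + m := by rw [hstart, neg_mul]; omega
  have hdvd_start : L ∣ start := ⟨-(PySem.Int.floordiv (-lo) L), by rw [hstart]; ring⟩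
  rw [List.perm_ext_iff_of_nodup
    (List.Nodup.filter _ (PySem.List.nodup_pyRange_one lo (hi + 1)))
    (nodup_pyRange_of_pos start (hi + 1) L hL)]
  intro x
  rw [List.mem_filter, PySem.List.mem_pyRange_one,
    PySem.List.mem_pyRange_iff_of_pos hL, decide_eq_true_iff]
  constructor
  · rintro ⟨⟨hlox, hxhi⟩, hdx⟩
    refine ⟨?_, hxhi, (dvd_sub_right hdx).mpr hdvd_start⟩
    by_contra hxs
    push Not at hxs
    have hds : L ∣ start - x := dvd_sub hdvd_start hdx
    have : L ≤ start - x := Int.le_of_dvd (by omega) hds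
    omega
  · rintro ⟨hsx, hxhi, hds⟩
    have hdx : L ∣ x := by
      have := dvd_add hds hdvd_start
      simpa using this
    exact ⟨⟨by omega, hxhi⟩, hdx⟩

-- ===== VERDICT (by name: the statement is the Claim_ definition above) =====
theorem getTotalX_spec : Claim_equal_getTotalX := by
  intro a b _ hpre
  obtain ⟨ha, hb, hcond⟩ := hpre
  obtain ⟨lo, hlo⟩ : ∃ lo, a.getLast? = some lo := by
    cases h : a.getLast? with
    | none => exact absurd (List.getLast?_eq_none_iff.mp h) ha
    | some v => exact ⟨v, rfl⟩
  obtain ⟨hi, hhi⟩ : ∃ hi, b.head? = some hi := by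
    cases h : b.head? with
    | none => exact absurd (List.head?_eq_none_iff.mp h) hb
    | some v => exact ⟨v, rfl⟩
  have hget0 : PySem.List.pyGet? b 0 = some hi := by
    rw [PySem.List.pyGet?_of_nonneg b (by norm_num), show ((0:Int)).toNat = 0 from rfl,
      ← List.head?_eq_getElem?]
    exact hhi
  unfold Spec_getTotalX getTotalX getTotalX_alt
  rw [PySem.List.pyGet?_neg_one, hlo, hget0]
  -- replace B's hand-rolled folds by Int.lcm / Int.gcd folds
  have hS : a.foldl (fun l x =>
        if l > max |lo| |hi| then l
        else
          let g := pyGcd l x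
          if g == 0 then 0 else PySem.Int.floordiv |l * x| g) 1
      = a.foldl (fun l x => if l > max |lo| |hi| then l else (Int.lcm l x : Int)) 1 := by
    refine PySem.List.foldl_congr_mem a _ _ 1 (fun l x _ => ?_)
    dsimp only
    split
    · rfl
    · exact step_eq_lcm l x
  have hG : b.foldl (fun g x => pyGcd g x) 0
      = b.foldl (fun g x => (Int.gcd g x : Int)) 0 :=
    PySem.List.foldl_congr_mem b _ _ 0 (fun g x _ => pyGcd_eq g x)
  simp only [hS, hG]
  set Lv := a.foldl (fun l x => if l > max |lo| |hi| then l else (Int.lcm l x : Int)) 1 with hLv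
  set Fv := a.foldl (fun l x => (Int.lcm l x : Int)) 1 with hFv
  set Gv := b.foldl (fun g x => (Int.gcd g x : Int)) 0 with hGv
  have hLnn : 0 ≤ Lv := satfold_nonneg a (max |lo| |hi|) 1 one_pos.le
  rcases le_or_gt lo hi with hlohi | hhilo
  · -- nonempty range
    obtain ⟨h0a, hsign⟩ := hcond lo hlo hi hhi hlohi
    have hFne : Fv ≠ 0 := foldl_lcm_ne_zero a 1 one_ne_zero (fun i hi hz => h0a (hz ▸ hi))
    rw [List.filter_filter, ← List.countP_eq_length_filter]
    rcases satfold_cases a (max |lo| |hi|) 1 with hsat | ⟨hbig, hdvdF⟩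
    · -- the saturating fold never saturated: it IS the lcm of a
      rw [← hFv, ← hLv] at hsat
      rw [hsat]
      have hLpos : 0 < Fv := lt_of_le_of_ne (hsat ▸ hLnn) (Ne.symm hFne)
      rw [if_pos (by simpa using hFne)]
      rw [PySem.List.foldl_if_add_one (fun n => n != 0 && (PySem.Int.mod Gv n == 0)), zero_add]
      have hcongr : (PySem.List.pyRange lo (hi + 1) 1).countP
          (fun n => (b.all fun i => PySem.Int.mod i n == 0) && (a.all fun i => PySem.Int.mod n i == 0))
          = (PySem.List.pyRange lo (hi + 1) 1).countP
          (fun n => (n != 0 && (PySem.Int.mod Gv n == 0)) && decide (Fv ∣ n)) := by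
        apply List.countP_congr
        intro n hn
        rw [PySem.List.mem_pyRange_one] at hn
        have hn0 : n ≠ 0 := by omega
        rw [Bool.eq_iff_iff]
        simp only [Bool.and_eq_true, List.all_eq_true, beq_iff_eq,
          PySem.Int.mod_eq_zero_iff_dvd, hFv, hGv, foldl_lcm_dvd, foldl_gcd_dvd,
          one_dvd, dvd_zero, true_and, decide_eq_true_iff, bne_iff_ne, ne_eq, hn0,
          not_false_eq_true]
        tauto
      rw [hcongr, ← List.countP_filter]
      congr 1
      rw [List.countP_eq_length_filter, List.countP_eq_length_filter]
      exact ((filter_dvd_perm_stepped Fv lo hi hLpos).filter _).length_eq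
    · -- the fold saturated: lcm(a) exceeds every candidate, both sides count 0
      rw [← hLv] at hbig
      rw [← hLv, ← hFv] at hdvdF
      have hLpos : 0 < Lv := by
        have : (0:Int) ≤ max |lo| |hi| := le_trans (abs_nonneg lo) (le_max_left _ _)
        omega
      have hxlim : ∀ x : Int, Lv ∣ x → x ≠ 0 → lo ≤ x → x ≤ hi → False := by
        intro x hdx hx0 hlox hxhi
        have h1 : Lv ∣ |x| := (dvd_abs _ _).mpr hdx
        have h2 : Lv ≤ |x| := Int.le_of_dvd (abs_pos.mpr hx0) h1
        have h3 : hi ≤ |hi| := le_abs_self hi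
        have h4 : -|lo| ≤ lo := neg_abs_le lo
        have h5 : |hi| ≤ max |lo| |hi| := le_max_right _ _
        have h6 : |lo| ≤ max |lo| |hi| := le_max_left _ _
        rcases abs_cases x with ⟨he, -⟩ | ⟨he, -⟩ <;> omega
      rw [if_pos (by simpa using hLpos.ne')]
      rw [PySem.List.foldl_if_add_one (fun n => n != 0 && (PySem.Int.mod Gv n == 0)), zero_add]
      have hA0 : (PySem.List.pyRange lo (hi + 1) 1).countP
          (fun n => (b.all fun i => PySem.Int.mod i n == 0) && (a.all fun i => PySem.Int.mod n i == 0)) = 0 := by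
        rw [List.countP_eq_zero]
        intro n hn hp
        rw [PySem.List.mem_pyRange_one] at hn
        simp only [Bool.and_eq_true, List.all_eq_true, beq_iff_eq,
          PySem.Int.mod_eq_zero_iff_dvd] at hp
        have hFn : Fv ∣ n := by
          rw [hFv, foldl_lcm_dvd]; exact ⟨one_dvd n, hp.2⟩
        have hn0 : n ≠ 0 := by omega
        exact hxlim n (dvd_trans hdvdF hFn) hn0 hn.1 (by omega)
      have hB0 : (PySem.List.pyRange (-(PySem.Int.floordiv (-lo) Lv) * Lv) (hi + 1) Lv).countP
          (fun n => n != 0 && (PySem.Int.mod Gv n == 0)) = 0 := by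
        rw [List.countP_eq_zero]
        intro n hn hp
        rw [PySem.List.mem_pyRange_iff_of_pos hLpos] at hn
        simp only [Bool.and_eq_true, bne_iff_ne, ne_eq] at hp
        have hid := PySem.Int.floordiv_mul_add_mod (-lo) Lv
        have hm0 := PySem.Int.mod_nonneg (-lo) hLpos
        have hdstart : Lv ∣ -(PySem.Int.floordiv (-lo) Lv) * Lv :=
          ⟨-(PySem.Int.floordiv (-lo) Lv), by ring⟩
        have hdn : Lv ∣ n := by
          have := dvd_add hn.2.2 hdstart
          simpa using this
        have hstart : -(PySem.Int.floordiv (-lo) Lv) * Lv = lo + PySem.Int.mod (-lo) Lv := by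
          rw [neg_mul]; omega
        rw [hstart] at hn
        exact hxlim n hdn hp.1 (by omega) (by omega)
      rw [hA0, hB0]
  · -- empty range: both counts are 0
    have hempty : PySem.List.pyRange lo (hi + 1) 1 = [] :=
      PySem.List.pyRange_one_eq_nil (by omega)
    rw [hempty]
    by_cases hLz : Lv = 0
    · simp [hLz]
    · have hLpos : 0 < Lv := lt_of_le_of_ne hLnn (Ne.symm hLz)
      rw [if_pos (by simpa using hLz)]
      have hid := PySem.Int.floordiv_mul_add_mod (-lo) Lv
      have hm0 := PySem.Int.mod_nonneg (-lo) hLpos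
      have hstepempty : PySem.List.pyRange (-(PySem.Int.floordiv (-lo) Lv) * Lv) (hi + 1) Lv = [] := by
        rw [PySem.List.pyRange_of_pos _ _ hLpos, if_neg (by rw [neg_mul]; omega)]
        simp
      rw [hstepempty]
      simp
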